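-- pv_equiv track=rewrite | github.com/cwgong/analysis_taiwan_pdf | ﻿flask-demo-service/models/v18.py | expand_imgform_by_caption
-- ===== SOURCE A (Python) =====
-- def expand_imgform_by_caption(boxes,title_box,tail_box,new_filt_box,new_filt_txts):
--     for idx,box in enumerate(boxes):#針對caption首尾內對物件進行文字搜索擴張
--         if title_box[idx] and tail_box[idx]:
--             tmp_box=box[:]
--             del_lst=[]
--             for idx1,txt in enumerate(list(new_filt_box)):
--                 if title_box[idx][1]<txt[1]<tail_box[idx][1]:
--                     if title_box[idx][2]-title_box[idx][0]<box[2]-box[0]: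
--                         if box[0]<(txt[0]+txt[2])>>1 <box[2]:
--                             del_lst.append(idx1)
--                             tmp_box=[min(txt[0],tmp_box[0]),min(txt[1],tmp_box[1]),max(txt[2],tmp_box[2]),max(txt[3],tmp_box[3])]
--                     else:
--                         if title_box[idx][0]<(txt[0]+txt[2])>>1 <title_box[idx][2]:
--                             del_lst.append(idx1)
--                             tmp_box=[min(txt[0],tmp_box[0]),min(txt[1],tmp_box[1]),max(txt[2],tmp_box[2]),max(txt[3],tmp_box[3])]
--             for idx1,i in enumerate(del_lst):
--                 del new_filt_box[i-idx1]
--                 del new_filt_txts[i-idx1]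
--             boxes[idx]=tmp_box
--     return boxes,new_filt_box,new_filt_txts
-- ===== SOURCE B (Python) =====
-- # B: one partition pass per caption: record the indices of matching text boxes in a
-- # set while growing the union box, then filter both parallel lists by that set,
-- # instead of collecting a delete list and deleting entries one by one with shifting
-- # offsets. Mutates boxes / new_filt_box / new_filt_txts in place, like the original.
-- def expand_imgform_by_caption(boxes, title_box, tail_box, new_filt_box, new_filt_txts):
--     for idx, box in enumerate(boxes):
--         if title_box[idx] and tail_box[idx]:
--             t, u = title_box[idx], tail_box[idx]
--             tmp = box[:]
--             matched = set()
--             for i, tb in enumerate(new_filt_box):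
--                 if t[1] < tb[1] < u[1] and (
--                         box[0] < (tb[0] + tb[2]) >> 1 < box[2]
--                         if t[2] - t[0] < box[2] - box[0]
--                         else t[0] < (tb[0] + tb[2]) >> 1 < t[2]):
--                     matched.add(i)
--                     tmp = [min(tb[0], tmp[0]), min(tb[1], tmp[1]),
--                            max(tb[2], tmp[2]), max(tb[3], tmp[3])]
--             if matched:
--                 new_filt_box[:] = [b for i, b in enumerate(new_filt_box) if i not in matched]
--                 new_filt_txts[:] = [s for i, s in enumerate(new_filt_txts) if i not in matched]
--             boxes[idx] = tmp
--     return boxes, new_filt_box, new_filt_txts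
-- ===== Notes on version B (the rewrite author's own statement) =====
-- stated objective: simpler
-- what changed: Replaces A's two-pass deletion (collect del_lst, then delete each collected index with a shifting i-idx1 offset) by recording the matched indices in a set during the scan and rebuilding both parallel lists with one filtering comprehension each; Pre_ excludes only inputs on which A raises IndexError (caption lists shorter than boxes, rows missing a coordinate that is actually read, or a matched text box whose index has no paired entry left in new_filt_txts).
import Mathlib
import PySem

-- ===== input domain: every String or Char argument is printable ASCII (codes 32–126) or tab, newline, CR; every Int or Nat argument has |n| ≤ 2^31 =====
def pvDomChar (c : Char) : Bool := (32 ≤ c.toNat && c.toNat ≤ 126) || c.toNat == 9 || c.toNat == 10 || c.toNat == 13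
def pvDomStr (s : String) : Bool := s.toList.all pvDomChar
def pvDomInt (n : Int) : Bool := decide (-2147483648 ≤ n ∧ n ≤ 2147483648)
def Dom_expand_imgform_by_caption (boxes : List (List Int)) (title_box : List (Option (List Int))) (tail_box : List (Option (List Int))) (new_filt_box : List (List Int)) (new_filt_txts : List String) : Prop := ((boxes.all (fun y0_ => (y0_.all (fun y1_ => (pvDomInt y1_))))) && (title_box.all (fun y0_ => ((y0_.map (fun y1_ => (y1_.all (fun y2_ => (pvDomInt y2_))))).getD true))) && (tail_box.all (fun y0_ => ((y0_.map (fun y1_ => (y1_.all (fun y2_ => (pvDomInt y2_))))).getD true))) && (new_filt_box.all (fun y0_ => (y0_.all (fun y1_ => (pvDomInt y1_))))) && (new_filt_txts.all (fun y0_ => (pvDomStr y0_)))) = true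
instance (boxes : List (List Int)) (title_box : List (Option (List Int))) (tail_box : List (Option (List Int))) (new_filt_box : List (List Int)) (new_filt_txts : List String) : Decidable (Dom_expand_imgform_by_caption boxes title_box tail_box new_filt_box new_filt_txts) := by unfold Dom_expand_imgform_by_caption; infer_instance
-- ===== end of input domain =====

-- ===== PORT A =====
-- A expands each captioned box by absorbing matching text boxes; it collects the matched
-- indices in del_lst, then deletes them in a second pass with a shifting offset.
-- Equivalence is about the RETURN value; the Python mutates its list arguments in place.

-- element getters (xs[i] for a nonnegative in-range index, with a default outside Pre_)
def pvAt (xs : List Int) (i : Nat) : Int := xs.getD i 0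
def pvOptAt (xs : List (Option (List Int))) (i : Nat) : Option (List Int) := xs.getD i none

-- truthiness of title_box[idx] / tail_box[idx] (None and [] are falsy)
def pvActive (o : Option (List Int)) : Bool :=
  match o with
  | none => false
  | some t => !t.isEmpty

-- tmp_box = [min(txt[0],tmp[0]), min(txt[1],tmp[1]), max(txt[2],tmp[2]), max(txt[3],tmp[3])]
def pvExpandBox (txt tmp : List Int) : List Int :=
  [min (pvAt txt 0) (pvAt tmp 0), min (pvAt txt 1) (pvAt tmp 1),
   max (pvAt txt 2) (pvAt tmp 2), max (pvAt txt 3) (pvAt tmp 3)]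

-- (txt[0]+txt[2]) >> 1
def pvMid (txt : List Int) : Int := (pvAt txt 0 + pvAt txt 2) >>> (1 : Nat)

-- title_box[idx][1] < txt[1] < tail_box[idx][1]
def pvBand (t u txt : List Int) : Bool :=
  decide (pvAt t 1 < pvAt txt 1) && decide (pvAt txt 1 < pvAt u 1)

-- A's inner loop: for idx1, txt in enumerate(list(new_filt_box)): build del_lst, update tmp_box
def pvInnerA (t u box : List Int) : Nat → List Nat → List Int → List (List Int) → List Nat × List Int
  | _, del_lst, tmp, [] => (del_lst, tmp)
  | idx1, del_lst, tmp, txt :: rest =>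
    if pvBand t u txt then
      if pvAt t 2 - pvAt t 0 < pvAt box 2 - pvAt box 0 then
        if pvAt box 0 < pvMid txt ∧ pvMid txt < pvAt box 2 then
          pvInnerA t u box (idx1 + 1) (del_lst ++ [idx1]) (pvExpandBox txt tmp) rest
        else pvInnerA t u box (idx1 + 1) del_lst tmp rest
      else
        if pvAt t 0 < pvMid txt ∧ pvMid txt < pvAt t 2 then
          pvInnerA t u box (idx1 + 1) (del_lst ++ [idx1]) (pvExpandBox txt tmp) rest
        else pvInnerA t u box (idx1 + 1) del_lst tmp rest
    else pvInnerA t u box (idx1 + 1) del_lst tmp rest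

-- A's delete pass: for idx1, i in enumerate(del_lst): del new_filt_box[i-idx1]; del new_filt_txts[i-idx1]
def pvDelPhase : Nat → List Nat → List (List Int) → List String → List (List Int) × List String
  | _, [], fb, ft => (fb, ft)
  | j, i :: l, fb, ft => pvDelPhase (j + 1) l (fb.eraseIdx (i - j)) (ft.eraseIdx (i - j))

-- A's outer loop: for idx, box in enumerate(boxes), with boxes[idx] = tmp_box
def pvLoopA (title_box tail_box : List (Option (List Int))) :
    Nat → List (List Int) → List (List Int) → List String →
    List (List Int) × List (List Int) × List String
  | _, [], fb, ft => ([], fb, ft)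
  | idx, box :: rest, fb, ft =>
    if pvActive (pvOptAt title_box idx) && pvActive (pvOptAt tail_box idx) then
      let t := (pvOptAt title_box idx).getD []
      let u := (pvOptAt tail_box idx).getD []
      let r := pvInnerA t u box 0 [] box fb
      let s := pvDelPhase 0 r.1 fb ft
      let rec' := pvLoopA title_box tail_box (idx + 1) rest s.1 s.2
      (r.2 :: rec'.1, rec'.2)
    else
      let rec' := pvLoopA title_box tail_box (idx + 1) rest fb ft
      (box :: rec'.1, rec'.2)

def expand_imgform_by_caption (boxes : List (List Int)) (title_box : List (Option (List Int))) (tail_box : List (Option (List Int))) (new_filt_box : List (List Int)) (new_filt_txts : List String) : List (List Int) × List (List Int) × List String :=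
  pvLoopA title_box tail_box 0 boxes new_filt_box new_filt_txts

-- ===== PORT B =====
-- B records the matched indices in a set while growing the union box, then rebuilds
-- both parallel lists with one filtering comprehension each.

-- B's matching condition: t[1] < tb[1] < u[1] and (box test if wide else title test)
def pvCondB (t u box txt : List Int) : Bool :=
  pvBand t u txt &&
    (if pvAt t 2 - pvAt t 0 < pvAt box 2 - pvAt box 0 then
      decide (pvAt box 0 < pvMid txt) && decide (pvMid txt < pvAt box 2)
    else
      decide (pvAt t 0 < pvMid txt) && decide (pvMid txt < pvAt t 2))

-- B's inner loop: for i, tb in enumerate(new_filt_box): matched.add(i), grow tmp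
def pvMatchB (t u box : List Int) : Int → PySem.Set Int × List Int → List (List Int) →
    PySem.Set Int × List Int
  | _, acc, [] => acc
  | i, acc, tb :: rest =>
    if pvCondB t u box tb then
      pvMatchB t u box (i + 1) (PySem.Set.add acc.1 i, pvExpandBox tb acc.2) rest
    else pvMatchB t u box (i + 1) acc rest

-- [x for i, x in enumerate(xs) if i not in matched]
def pvKeepB {α : Type} (matched : PySem.Set Int) (xs : List α) : List α :=
  ((PySem.List.enumerate xs).filter (fun p => !(PySem.Set.contains matched p.1))).map (·.2)

def pvLoopB (title_box tail_box : List (Option (List Int))) :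
    Nat → List (List Int) → List (List Int) → List String →
    List (List Int) × List (List Int) × List String
  | _, [], fb, ft => ([], fb, ft)
  | idx, box :: rest, fb, ft =>
    if pvActive (pvOptAt title_box idx) && pvActive (pvOptAt tail_box idx) then
      let t := (pvOptAt title_box idx).getD []
      let u := (pvOptAt tail_box idx).getD []
      let r := pvMatchB t u box 0 (PySem.Set.empty, box) fb
      let fb' := if r.1.isEmpty then fb else pvKeepB r.1 fb
      let ft' := if r.1.isEmpty then ft else pvKeepB r.1 ft
      let rec' := pvLoopB title_box tail_box (idx + 1) rest fb' ft'
      (r.2 :: rec'.1, rec'.2)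
    else
      let rec' := pvLoopB title_box tail_box (idx + 1) rest fb ft
      (box :: rec'.1, rec'.2)

def expand_imgform_by_caption_alt (boxes : List (List Int)) (title_box : List (Option (List Int))) (tail_box : List (Option (List Int))) (new_filt_box : List (List Int)) (new_filt_txts : List String) : List (List Int) × List (List Int) × List String :=
  pvLoopB title_box tail_box 0 boxes new_filt_box new_filt_txts

-- ===== PRECONDITION & SPEC =====
def pvActiveAt (title_box tail_box : List (Option (List Int))) (i : Nat) : Bool :=
  pvActive (pvOptAt title_box i) && pvActive (pvOptAt tail_box i)

-- caption lists long enough for the indexings A performs (title_box[idx]; tail_box[idx] when title is truthy)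
def pvPreIdx (boxes : List (List Int)) (title_box tail_box : List (Option (List Int))) : Prop :=
  boxes.length ≤ title_box.length ∧
  (∀ i ∈ List.range boxes.length, pvActive (pvOptAt title_box i) = true → i < tail_box.length)

-- rows hold every coordinate that A's lazily-evaluated tests actually read
def pvPreRows (boxes : List (List Int)) (title_box tail_box : List (Option (List Int))) (new_filt_box : List (List Int)) : Prop :=
  ∀ i ∈ List.range boxes.length, pvActiveAt title_box tail_box i = true → new_filt_box ≠ [] →
    2 ≤ ((pvOptAt title_box i).getD []).length ∧
    ∀ tb ∈ new_filt_box, 2 ≤ tb.length ∧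
      (pvAt ((pvOptAt title_box i).getD []) 1 < pvAt tb 1 →
        2 ≤ ((pvOptAt tail_box i).getD []).length) ∧
      (pvBand ((pvOptAt title_box i).getD []) ((pvOptAt tail_box i).getD []) tb = true →
        3 ≤ ((pvOptAt title_box i).getD []).length ∧ 3 ≤ (boxes.getD i []).length ∧
        3 ≤ tb.length) ∧
      (pvCondB ((pvOptAt title_box i).getD []) ((pvOptAt tail_box i).getD [])
          (boxes.getD i []) tb = true →
        4 ≤ tb.length ∧ 4 ≤ (boxes.getD i []).length)

-- Pre_ excludes exactly the inputs on which Python A raises an IndexError: caption lists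
-- shorter than boxes, rows missing a coordinate that the lazily-evaluated tests actually
-- read, and a text box beyond len(new_filt_txts) matching an active caption (there A's
-- delete pass runs out of paired texts, while B would return the filtered lists).
def Pre_expand_imgform_by_caption (boxes : List (List Int)) (title_box : List (Option (List Int))) (tail_box : List (Option (List Int))) (new_filt_box : List (List Int)) (new_filt_txts : List String) : Prop :=
  pvPreIdx boxes title_box tail_box ∧
  pvPreRows boxes title_box tail_box new_filt_box ∧
  (∀ i ∈ List.range boxes.length, pvActiveAt title_box tail_box i = true →
    ∀ x ∈ new_filt_box.drop new_filt_txts.length,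
      pvCondB ((pvOptAt title_box i).getD []) ((pvOptAt tail_box i).getD [])
        (boxes.getD i []) x = false)
instance (boxes : List (List Int)) (title_box : List (Option (List Int))) (tail_box : List (Option (List Int))) (new_filt_box : List (List Int)) (new_filt_txts : List String) : Decidable (Pre_expand_imgform_by_caption boxes title_box tail_box new_filt_box new_filt_txts) := by unfold Pre_expand_imgform_by_caption pvPreIdx pvPreRows; infer_instance

def pvWitness_expand_imgform_by_caption : List (List Int) × List (Option (List Int)) × List (Option (List Int)) × List (List Int) × List String :=
  ([[0, 0, 10, 10]], [some [0, 1, 9]], [some [0, 8]], [[2, 2, 6, 6]], ["x"])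

def Spec_expand_imgform_by_caption (boxes : List (List Int)) (title_box : List (Option (List Int))) (tail_box : List (Option (List Int))) (new_filt_box : List (List Int)) (new_filt_txts : List String) (out : List (List Int) × List (List Int) × List String) : Prop := out = expand_imgform_by_caption_alt boxes title_box tail_box new_filt_box new_filt_txts
instance (boxes : List (List Int)) (title_box : List (Option (List Int))) (tail_box : List (Option (List Int))) (new_filt_box : List (List Int)) (new_filt_txts : List String) (out : List (List Int) × List (List Int) × List String) : Decidable (Spec_expand_imgform_by_caption boxes title_box tail_box new_filt_box new_filt_txts out) := by unfold Spec_expand_imgform_by_caption; infer_instance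

-- ===== CLAIM (what is proved, stated in full; the proofs are below) =====
def Claim_equal_expand_imgform_by_caption : Prop := ∀ (boxes : List (List Int)) (title_box : List (Option (List Int))) (tail_box : List (Option (List Int))) (new_filt_box : List (List Int)) (new_filt_txts : List String), Dom_expand_imgform_by_caption boxes title_box tail_box new_filt_box new_filt_txts → Pre_expand_imgform_by_caption boxes title_box tail_box new_filt_box new_filt_txts → Spec_expand_imgform_by_caption boxes title_box tail_box new_filt_box new_filt_txts (expand_imgform_by_caption boxes title_box tail_box new_filt_box new_filt_txts)

-- ===== LEMMAS AND PROOFS =====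

-- indices (starting at k) of the text boxes matching B's condition
def pvMatchedIdx (t u box : List Int) (k : Nat) : List (List Int) → List Nat
  | [] => []
  | tb :: rest =>
    if pvCondB t u box tb then k :: pvMatchedIdx t u box (k + 1) rest
    else pvMatchedIdx t u box (k + 1) rest

-- "l is a legal delete schedule after j deletions": entries grow at least by 1 per step
def pvStepped : Nat → List Nat → Prop
  | _, [] => True
  | j, i :: l => j ≤ i ∧ pvStepped (j + 1) l

-- keep the elements whose position (counted from k) is not in m
def pvFilterOut {α : Type} (m : List Nat) : Nat → List α → List α
  | _, [] => []
  | k, x :: xs => if k ∈ m then pvFilterOut m (k + 1) xs else x :: pvFilterOut m (k + 1) xs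

lemma pvInnerA_fst (t u box : List Int) (fb : List (List Int)) :
    ∀ (k : Nat) (dl : List Nat) (tmp : List Int),
      (pvInnerA t u box k dl tmp fb).1 = dl ++ pvMatchedIdx t u box k fb := by
  induction fb with
  | nil => intro k dl tmp; simp [pvInnerA, pvMatchedIdx]
  | cons tb rest ih =>
    intro k dl tmp
    by_cases hb : pvBand t u tb = true <;>
      by_cases hw : pvAt t 2 - pvAt t 0 < pvAt box 2 - pvAt box 0 <;>
        by_cases h1 : pvAt box 0 < pvMid tb <;> by_cases h2 : pvMid tb < pvAt box 2 <;>
          by_cases h3 : pvAt t 0 < pvMid tb <;> by_cases h4 : pvMid tb < pvAt t 2 <;>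
            simp [pvInnerA, pvMatchedIdx, pvCondB, hb, hw, h1, h2, h3, h4, ih]

lemma pvInnerA_snd (t u box : List Int) (fb : List (List Int)) :
    ∀ (k : Nat) (dl : List Nat) (tmp : List Int),
      (pvInnerA t u box k dl tmp fb).2 =
        (fb.filter (pvCondB t u box)).foldl (fun tmp tb => pvExpandBox tb tmp) tmp := by
  induction fb with
  | nil => intro k dl tmp; simp [pvInnerA]
  | cons tb rest ih =>
    intro k dl tmp
    by_cases hb : pvBand t u tb = true <;>
      by_cases hw : pvAt t 2 - pvAt t 0 < pvAt box 2 - pvAt box 0 <;>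
        by_cases h1 : pvAt box 0 < pvMid tb <;> by_cases h2 : pvMid tb < pvAt box 2 <;>
          by_cases h3 : pvAt t 0 < pvMid tb <;> by_cases h4 : pvMid tb < pvAt t 2 <;>
            simp [pvInnerA, pvCondB, List.filter, hb, hw, h1, h2, h3, h4, ih]

lemma pvMatchedIdx_succ (t u box : List Int) (fb : List (List Int)) :
    ∀ k : Nat, pvMatchedIdx t u box (k + 1) fb = (pvMatchedIdx t u box k fb).map (· + 1) := by
  induction fb with
  | nil => intro k; simp [pvMatchedIdx]
  | cons tb rest ih =>
    intro k
    by_cases hc : pvCondB t u box tb = true <;> simp [pvMatchedIdx, hc, ih]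

lemma pvMatchedIdx_nil (t u box : List Int) (fb : List (List Int)) :
    ∀ k : Nat, (∀ x ∈ fb, pvCondB t u box x = false) → pvMatchedIdx t u box k fb = [] := by
  induction fb with
  | nil => intro k _; simp [pvMatchedIdx]
  | cons tb rest ih =>
    intro k h
    have hc : pvCondB t u box tb = false := h tb (by simp)
    simp [pvMatchedIdx, hc, ih (k + 1) (fun x hx => h x (by simp [hx]))]

lemma pvStepped_mono (l : List Nat) : ∀ j j' : Nat, j ≤ j' → pvStepped j' l → pvStepped j l := by
  induction l with
  | nil => intro j j' _ _; trivial
  | cons i r ih =>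
    intro j j' hle h
    exact ⟨le_trans hle h.1, ih (j + 1) (j' + 1) (by omega) h.2⟩

lemma pvStepped_matched (t u box : List Int) (fb : List (List Int)) :
    ∀ k : Nat, pvStepped k (pvMatchedIdx t u box k fb) := by
  induction fb with
  | nil => intro k; trivial
  | cons tb rest ih =>
    intro k
    by_cases hc : pvCondB t u box tb = true
    · simpa [pvMatchedIdx, hc] using ⟨le_refl k, ih (k + 1)⟩
    · simpa [pvMatchedIdx, hc] using pvStepped_mono _ k (k + 1) (by omega) (ih (k + 1))

lemma pvDelPhase_shift (l : List Nat) :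
    ∀ (j : Nat) (fb : List (List Int)) (ft : List String),
      pvDelPhase (j + 1) (l.map (· + 1)) fb ft = pvDelPhase j l fb ft := by
  induction l with
  | nil => intro j fb ft; simp [pvDelPhase]
  | cons i r ih =>
    intro j fb ft
    simp only [List.map_cons, pvDelPhase, Nat.succ_sub_succ]
    exact ih (j + 1) _ _

lemma pvDelPhase_cons (l : List Nat) :
    ∀ (j : Nat) (x : List Int) (xs : List (List Int)) (y : String) (ys : List String),
      pvStepped j l →
      pvDelPhase j (l.map (· + 1)) (x :: xs) (y :: ys) =
        ((x :: (pvDelPhase j l xs ys).1), y :: (pvDelPhase j l xs ys).2) := by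
  induction l with
  | nil => intro j x xs y ys _; simp [pvDelPhase]
  | cons i r ih =>
    intro j x xs y ys h
    obtain ⟨hji, hr⟩ := h
    have hij : i + 1 - j = (i - j) + 1 := by omega
    simp only [List.map_cons, pvDelPhase, hij, List.eraseIdx]
    exact ih (j + 1) x _ y _ hr

-- B's accumulated tmp is the same fold as A's
lemma pvMatchB_snd (t u box : List Int) (fb : List (List Int)) :
    ∀ (i : Int) (m : PySem.Set Int) (tmp : List Int),
      (pvMatchB t u box i (m, tmp) fb).2 =
        (fb.filter (pvCondB t u box)).foldl (fun tmp tb => pvExpandBox tb tmp) tmp := by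
  induction fb with
  | nil => intro i m tmp; simp [pvMatchB]
  | cons tb rest ih =>
    intro i m tmp
    by_cases hc : pvCondB t u box tb = true <;>
      simp [pvMatchB, List.filter, hc, ih]

-- B's matched set lists the matched indices in increasing order
lemma pvMatchB_fst (t u box : List Int) (fb : List (List Int)) :
    ∀ (k : Nat) (m : PySem.Set Int) (tmp : List Int), (∀ x ∈ m, x < (k : Int)) →
      (pvMatchB t u box (k : Int) (m, tmp) fb).1 =
        m ++ (pvMatchedIdx t u box k fb).map (fun n => (n : Int)) := by
  induction fb with
  | nil => intro k m tmp _; simp [pvMatchB, pvMatchedIdx]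
  | cons tb rest ih =>
    intro k m tmp hm
    by_cases hc : pvCondB t u box tb = true
    · have hnm : ¬ ((k : Int) ∈ m) := fun h => absurd (hm _ h) (by omega)
      have hadd : PySem.Set.add m (k : Int) = m ++ [(k : Int)] := by
        simp [PySem.Set.add, hnm]
      have hcast : (k : Int) + 1 = ((k + 1 : Nat) : Int) := by push_cast; ring
      have hm' : ∀ x ∈ m ++ [(k : Int)], x < ((k + 1 : Nat) : Int) := by
        intro x hx
        rcases List.mem_append.1 hx with h | h
        · have := hm x h; push_cast; omega
        · simp at h; subst h; push_cast; omega
      simp only [pvMatchB, hc, if_pos, hadd, hcast]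
      rw [ih (k + 1) _ _ hm']
      simp [pvMatchedIdx, hc, List.append_assoc]
    · have hcast : (k : Int) + 1 = ((k + 1 : Nat) : Int) := by push_cast; ring
      have hm' : ∀ x ∈ m, x < ((k + 1 : Nat) : Int) := by
        intro x hx; have := hm x hx; push_cast; omega
      simp only [pvMatchB, hc, if_neg, Bool.false_eq_true, not_false_iff, hcast]
      rw [ih (k + 1) _ _ hm']
      simp [pvMatchedIdx, hc]

-- the filtering comprehension over enumerate equals pvFilterOut
lemma pvKeepB_bridge {α : Type} (m : List Nat) (xs : List α) :
    ∀ k : Nat,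
      ((PySem.List.enumerate xs ((k : Nat) : Int)).filter
          (fun p => !(PySem.Set.contains (m.map (fun n => (n : Int))) p.1))).map (·.2) =
        pvFilterOut m k xs := by
  induction xs with
  | nil => intro k; simp [PySem.List.enumerate_nil, pvFilterOut]
  | cons x xs ih =>
    intro k
    have hcast : ((k : Nat) : Int) + 1 = ((k + 1 : Nat) : Int) := by push_cast; ring
    have hmem : (PySem.Set.contains (m.map (fun n => (n : Int))) ((k : Nat) : Int))
        = decide (k ∈ m) := by
      simp [PySem.Set.contains]
    rw [PySem.List.enumerate_cons, hcast]
    by_cases h : k ∈ m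
    · simp only [List.filter_cons, hmem]
      simp only [h, decide_true, Bool.not_true, Bool.false_eq_true, if_false]
      rw [ih (k + 1)]
      simp [pvFilterOut, h]
    · simp only [List.filter_cons, hmem]
      simp only [h, decide_false, Bool.not_false, if_true, List.map_cons]
      rw [ih (k + 1)]
      simp [pvFilterOut, h]

lemma pvFilterOut_nilm {α : Type} (xs : List α) : ∀ k : Nat, pvFilterOut [] k xs = xs := by
  induction xs with
  | nil => intro k; simp [pvFilterOut]
  | cons x xs ih => intro k; simp [pvFilterOut, ih]

lemma pvFilterOut_congr {α : Type} (m1 m2 : List Nat) (xs : List α) :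
    ∀ k : Nat, (∀ j, k ≤ j → (j ∈ m1 ↔ j ∈ m2)) →
      pvFilterOut m1 k xs = pvFilterOut m2 k xs := by
  induction xs with
  | nil => intro k _; simp [pvFilterOut]
  | cons x xs ih =>
    intro k h
    have hk : (k ∈ m1) ↔ (k ∈ m2) := h k (le_refl k)
    have htail := ih (k + 1) (fun j hj => h j (by omega))
    by_cases h1 : k ∈ m1
    · simp [pvFilterOut, h1, hk.1 h1, htail]
    · have h2 : k ∉ m2 := fun hh => h1 (hk.2 hh)
      simp [pvFilterOut, h1, h2, htail]

lemma pvFilterOut_shift {α : Type} (m : List Nat) (xs : List α) :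
    ∀ k : Nat, pvFilterOut (m.map (· + 1)) (k + 1) xs = pvFilterOut m k xs := by
  induction xs with
  | nil => intro k; simp [pvFilterOut]
  | cons x xs ih =>
    intro k
    have hmem : ((k + 1) ∈ m.map (· + 1)) ↔ (k ∈ m) := by
      simp
    by_cases h : k ∈ m
    · simp [pvFilterOut, h, hmem.2 h, ih]
    · have h2 : (k + 1) ∉ m.map (· + 1) := fun hh => h (hmem.1 hh)
      simp [pvFilterOut, h, h2, ih]

-- the per-caption step: A's delete pass equals B's index filtering, and the overhang
-- (the boxes beyond the paired texts) is untouched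
lemma pvStep_eq (t u box : List Int) (fb : List (List Int)) :
    ∀ ft : List String, (∀ x ∈ fb.drop ft.length, pvCondB t u box x = false) →
      pvDelPhase 0 (pvMatchedIdx t u box 0 fb) fb ft =
        (pvFilterOut (pvMatchedIdx t u box 0 fb) 0 fb,
         pvFilterOut (pvMatchedIdx t u box 0 fb) 0 ft) ∧
      (pvFilterOut (pvMatchedIdx t u box 0 fb) 0 fb).drop
          ((pvFilterOut (pvMatchedIdx t u box 0 fb) 0 ft).length) = fb.drop ft.length := by
  induction fb with
  | nil =>
    intro ft _
    constructor
    · simp [pvMatchedIdx, pvDelPhase, pvFilterOut, pvFilterOut_nilm]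
    · simp [pvMatchedIdx, pvFilterOut]
  | cons tb fbs ih =>
    intro ft h
    by_cases hc : pvCondB t u box tb = true
    · match ft with
      | [] =>
        exact absurd (h tb (by simp)) (by simp [hc])
      | tx :: fts =>
        have hh : ∀ x ∈ fbs.drop fts.length, pvCondB t u box x = false := by
          intro x hx; exact h x (by simpa using hx)
        obtain ⟨ih1, ih2⟩ := ih fts hh
        have hmi : pvMatchedIdx t u box 0 (tb :: fbs) =
            0 :: (pvMatchedIdx t u box 0 fbs).map (· + 1) := by
          simp [pvMatchedIdx, hc, pvMatchedIdx_succ]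
        have hf : ∀ {β : Type} (ys : List β),
            pvFilterOut (0 :: (pvMatchedIdx t u box 0 fbs).map (· + 1)) 1 ys =
              pvFilterOut (pvMatchedIdx t u box 0 fbs) 0 ys := by
          intro β ys
          rw [pvFilterOut_congr (0 :: (pvMatchedIdx t u box 0 fbs).map (· + 1))
            ((pvMatchedIdx t u box 0 fbs).map (· + 1)) ys 1 (by intro j hj; simp; omega)]
          exact pvFilterOut_shift _ _ 0
        have e : ∀ {β : Type} (y : β) (ys : List β),
            pvFilterOut (0 :: (pvMatchedIdx t u box 0 fbs).map (· + 1)) 0 (y :: ys) =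
              pvFilterOut (pvMatchedIdx t u box 0 fbs) 0 ys := by
          intro β y ys
          have h0 : (0 : Nat) ∈ 0 :: (pvMatchedIdx t u box 0 fbs).map (· + 1) := by simp
          simp only [pvFilterOut, if_pos h0]
          exact hf ys
        constructor
        · rw [hmi]
          simp only [pvDelPhase, List.eraseIdx]
          rw [pvDelPhase_shift, ih1, e tb fbs, e tx fts]
        · rw [hmi, e tb fbs, e tx fts, ih2]
          simp
    · have hmi : pvMatchedIdx t u box 0 (tb :: fbs) =
          (pvMatchedIdx t u box 0 fbs).map (· + 1) := by
        simp [pvMatchedIdx, hc, pvMatchedIdx_succ]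
      have h0 : (0 : Nat) ∉ (pvMatchedIdx t u box 0 fbs).map (· + 1) := by
        simp
      have e : ∀ {β : Type} (y : β) (ys : List β),
          pvFilterOut ((pvMatchedIdx t u box 0 fbs).map (· + 1)) 0 (y :: ys) =
            y :: pvFilterOut (pvMatchedIdx t u box 0 fbs) 0 ys := by
        intro β y ys
        simp only [pvFilterOut, if_neg h0]
        rw [pvFilterOut_shift]
      match ft with
      | [] =>
        have hall : ∀ x ∈ tb :: fbs, pvCondB t u box x = false := by
          intro x hx; exact h x (by simpa using hx)
        have hnil : pvMatchedIdx t u box 0 fbs = [] :=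
          pvMatchedIdx_nil t u box fbs 0 (fun x hx => hall x (by simp [hx]))
        rw [hmi, hnil]
        constructor
        · simp [pvDelPhase, pvFilterOut_nilm, pvFilterOut]
        · simp [pvFilterOut_nilm, pvFilterOut]
      | tx :: fts =>
        have hh : ∀ x ∈ fbs.drop fts.length, pvCondB t u box x = false := by
          intro x hx; exact h x (by simpa using hx)
        obtain ⟨ih1, ih2⟩ := ih fts hh
        rw [hmi]
        rw [pvDelPhase_cons _ 0 _ _ _ _ (pvStepped_matched t u box fbs 0)]
        constructor
        · rw [ih1, e tb fbs, e tx fts]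
        · rw [e tb fbs, e tx fts]
          simpa using ih2

lemma pvLoop_eq (title_box tail_box : List (Option (List Int))) (rest : List (List Int)) :
    ∀ (idx : Nat) (fb : List (List Int)) (ft : List String),
      (∀ i ∈ List.range rest.length, pvActiveAt title_box tail_box (idx + i) = true →
        ∀ x ∈ fb.drop ft.length,
          pvCondB ((pvOptAt title_box (idx + i)).getD []) ((pvOptAt tail_box (idx + i)).getD [])
            (rest.getD i []) x = false) →
      pvLoopA title_box tail_box idx rest fb ft = pvLoopB title_box tail_box idx rest fb ft := by
  induction rest with
  | nil => intro idx fb ft _; simp [pvLoopA, pvLoopB]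
  | cons box r ih =>
    intro idx fb ft H
    have Htail : ∀ (fb' : List (List Int)) (ft' : List String),
        fb'.drop ft'.length = fb.drop ft.length →
        ∀ i ∈ List.range r.length, pvActiveAt title_box tail_box (idx + 1 + i) = true →
          ∀ x ∈ fb'.drop ft'.length,
            pvCondB ((pvOptAt title_box (idx + 1 + i)).getD [])
              ((pvOptAt tail_box (idx + 1 + i)).getD []) (r.getD i []) x = false := by
      intro fb' ft' hd i hi hact x hx
      rw [hd] at hx
      have := H (i + 1) (by simp at hi ⊢; omega)
        (by rw [show idx + (i + 1) = idx + 1 + i by omega]; exact hact) x hx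
      rw [show idx + (i + 1) = idx + 1 + i by omega] at this
      simpa using this
    by_cases ha : (pvActive (pvOptAt title_box idx) && pvActive (pvOptAt tail_box idx)) = true
    · have h0 := H 0 (by simp) (by simpa [pvActiveAt] using ha)
      simp only [Nat.add_zero, List.getD_cons_zero] at h0
      obtain ⟨hstep, hdrop⟩ := pvStep_eq ((pvOptAt title_box idx).getD [])
        ((pvOptAt tail_box idx).getD []) box fb ft h0
      have hfst := pvInnerA_fst ((pvOptAt title_box idx).getD [])
        ((pvOptAt tail_box idx).getD []) box fb 0 [] box
      have hsnd := pvInnerA_snd ((pvOptAt title_box idx).getD [])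
        ((pvOptAt tail_box idx).getD []) box fb 0 [] box
      have hbm := pvMatchB_fst ((pvOptAt title_box idx).getD [])
        ((pvOptAt tail_box idx).getD []) box fb 0 PySem.Set.empty box
        (by intro x hx; simp [PySem.Set.empty] at hx)
      have hbs := pvMatchB_snd ((pvOptAt title_box idx).getD [])
        ((pvOptAt tail_box idx).getD []) box fb 0 PySem.Set.empty box
      have hkfb := pvKeepB_bridge (pvMatchedIdx ((pvOptAt title_box idx).getD [])
        ((pvOptAt tail_box idx).getD []) box 0 fb) fb 0
      have hkft := pvKeepB_bridge (pvMatchedIdx ((pvOptAt title_box idx).getD [])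
        ((pvOptAt tail_box idx).getD []) box 0 fb) ft 0
      simp only [Nat.cast_zero] at hbm hbs hkfb hkft
      simp only [PySem.Set.empty, List.nil_append] at hbm
      simp only [PySem.Set.empty] at hbs
      simp only [pvLoopA, pvLoopB, ha, if_pos]
      simp only [PySem.Set.empty]
      by_cases hm : pvMatchedIdx ((pvOptAt title_box idx).getD [])
          ((pvOptAt tail_box idx).getD []) box 0 fb = []
      · rw [hfst, List.nil_append, hm, hbm, hbs, hsnd, hm]
        have hdel : pvDelPhase 0 [] fb ft = (fb, ft) := by simp [pvDelPhase]
        rw [hdel, ih (idx + 1) fb ft (Htail fb ft rfl)]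
        simp
      · have hne : ((pvMatchedIdx ((pvOptAt title_box idx).getD [])
            ((pvOptAt tail_box idx).getD []) box 0 fb).map
              (fun n => (n : Int))).isEmpty = false := by
          cases hmm : pvMatchedIdx ((pvOptAt title_box idx).getD [])
              ((pvOptAt tail_box idx).getD []) box 0 fb with
          | nil => exact absurd hmm hm
          | cons a l => simp
        rw [hfst, List.nil_append, hstep, hbm, hbs, hsnd, hne]
        simp only [Bool.false_eq_true, if_false]
        unfold pvKeepB
        rw [hkfb, hkft, ih (idx + 1) _ _ (Htail _ _ hdrop)]
    · simp only [pvLoopA, pvLoopB]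
      rw [if_neg ha, if_neg ha, ih (idx + 1) fb ft (Htail fb ft rfl)]

-- ===== VERDICT (by name: the statement is the Claim_ definition above) =====
theorem expand_imgform_by_caption_spec : Claim_equal_expand_imgform_by_caption := by
  intro boxes title_box tail_box new_filt_box new_filt_txts _ hpre
  unfold Spec_expand_imgform_by_caption expand_imgform_by_caption expand_imgform_by_caption_alt
  apply pvLoop_eq
  intro i hi hact x hx
  simpa using hpre.2.2 i (by simpa using hi) (by simpa using hact) x hx
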